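-- pv_equiv track=rewrite | github.com/aayush-xid-su/Advent-of-Code-2025 | day06/day6part1.py | find_problem_ranges
-- ===== SOURCE A (Python) =====
-- def find_problem_ranges(grid):
--     cols = list(zip(*grid)) if grid else []
--     blank_indices = [i for i, col in enumerate(cols) if all(ch == " " for ch in col)]
--     ranges = []
--     start = 0
--     for b in blank_indices:
--         if b > start:
--             ranges.append((start, b))
--         start = b + 1
--     width = len(cols)
--     if start < width:
--         ranges.append((start, width))
--     return ranges
-- ===== SOURCE B (Python) =====
-- def find_problem_ranges(grid):
--     # Fold the rows into one boolean "blank" mask (character-wise AND, zip-truncating),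
--     # then group the mask into maximal non-blank runs with an Optional run-start.
--     mask = []
--     if grid:
--         mask = [c == " " for c in grid[0]]
--         for row in grid[1:]:
--             mask = [m and c == " " for m, c in zip(mask, row)]
--     ranges = []
--     start = None
--     for i, blank in enumerate(mask):
--         if blank:
--             if start is not None:
--                 ranges.append((start, i))
--                 start = None
--         elif start is None:
--             start = i
--     if start is not None:
--         ranges.append((start, len(mask)))
--     return ranges
-- ===== Notes on version B (the rewrite author's own statement) =====
-- stated objective: alternative
-- what changed: B never looks at columns: it folds the rows into one boolean blank-mask by character-wise AND (zip-truncating), then groups that mask into maximal non-blank runs with an Optional run-start state machine, instead of A's transpose + blank-index list + gap loop.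
import Mathlib
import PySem

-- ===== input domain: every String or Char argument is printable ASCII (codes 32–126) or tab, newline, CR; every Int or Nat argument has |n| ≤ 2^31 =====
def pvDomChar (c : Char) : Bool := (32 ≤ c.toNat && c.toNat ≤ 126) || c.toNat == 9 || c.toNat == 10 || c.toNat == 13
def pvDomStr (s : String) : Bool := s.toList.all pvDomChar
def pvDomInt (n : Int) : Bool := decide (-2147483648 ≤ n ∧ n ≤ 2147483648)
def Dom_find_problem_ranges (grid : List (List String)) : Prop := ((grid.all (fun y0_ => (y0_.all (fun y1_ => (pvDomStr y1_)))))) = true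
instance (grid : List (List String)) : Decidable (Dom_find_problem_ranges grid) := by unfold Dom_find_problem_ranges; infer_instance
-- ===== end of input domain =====

-- B replaces A's transpose + blank-index list + gap loop by a row-wise AND-fold into one
-- boolean blank-mask followed by a run-grouping state machine (alternative decomposition).

-- ===== PORT A =====
-- zip(*grid) for a nonempty grid: truncating transpose, exactly Python's zip
def pyZipStar (rows : List (List String)) : List (List String) :=
  match rows with
  | [] => []
  | r :: rs =>
    if h : !r.isEmpty && rs.all (fun row => !row.isEmpty) then
      ((r :: rs).map (fun row => row.headD "")) :: pyZipStar (r.tail :: rs.map (fun row => row.tail))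
    else []
termination_by (rows.headD []).length
decreasing_by
  simp only [List.headD_cons]
  simp only [Bool.and_eq_true, Bool.not_eq_true', List.isEmpty_eq_false_iff] at h
  have : r ≠ [] := h.1
  cases r with
  | nil => exact absurd rfl this
  | cons a t => simp [List.tail_cons]

def find_problem_ranges (grid : List (List String)) : List (Int × Int) :=
  let cols : List (List String) := if grid.isEmpty then [] else pyZipStar grid
  let blank_indices : List Int :=
    ((PySem.List.enumerate cols 0).filter (fun p => p.2.all (fun ch => ch == " "))).map (fun p => p.1)
  let st := blank_indices.foldl
      (fun (st : List (Int × Int) × Int) b =>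
        ((if b > st.2 then st.1 ++ [(st.2, b)] else st.1), b + 1)) ([], 0)
  let width : Int := (cols.length : Int)
  if st.2 < width then st.1 ++ [(st.2, width)] else st.1

-- ===== PORT B =====
def find_problem_ranges_alt (grid : List (List String)) : List (Int × Int) :=
  let mask : List Bool :=
    match grid with
    | [] => []
    | r :: rs =>
      rs.foldl (fun m row => List.zipWith (fun b c => b && (c == " ")) m row)
        (r.map (fun c => c == " "))
  let st := (PySem.List.enumerate mask 0).foldl
      (fun (st : List (Int × Int) × Option Int) p =>
        if p.2 then
          ((match st.2 with
            | some s => st.1 ++ [(s, p.1)]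
            | none => st.1), none)
        else
          (st.1, match st.2 with
                 | none => some p.1
                 | some s => some s)) ([], none)
  match st.2 with
  | some s => st.1 ++ [(s, (mask.length : Int))]
  | none => st.1

-- ===== PRECONDITION & SPEC =====
def Spec_find_problem_ranges (grid : List (List String)) (out : List (Int × Int)) : Prop := out = find_problem_ranges_alt grid
instance (grid : List (List String)) (out : List (Int × Int)) : Decidable (Spec_find_problem_ranges grid out) := by unfold Spec_find_problem_ranges; infer_instance

-- ===== CLAIM (what is proved, stated in full; the proofs are below) =====
def Claim_equal_find_problem_ranges : Prop := ∀ (grid : List (List String)), Dom_find_problem_ranges grid → Spec_find_problem_ranges grid (find_problem_ranges grid)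

-- ===== LEMMAS AND PROOFS =====

-- the column at index i, and the "min row length" width
def pvColAt (grid : List (List String)) (i : Nat) : List String :=
  grid.map (fun row => row.getD i "")

def pvM (r : List String) (rs : List (List String)) : Nat :=
  (rs.map (fun row => row.length)).foldl min r.length

theorem pv_getD_tail (row : List String) (i : Nat) :
    row.tail.getD i "" = row.getD (i + 1) "" := by
  cases row <;> simp

theorem pv_foldl_min_sub (l : List Nat) (a : Nat) (ha : 1 ≤ a) (hl : ∀ x ∈ l, 1 ≤ x) :
    (l.map (fun x => x - 1)).foldl min (a - 1) = l.foldl min a - 1 := by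
  induction l generalizing a with
  | nil => rfl
  | cons x t ih =>
    have hx : 1 ≤ x := hl x (by simp)
    have h1 : min a x - 1 = min (a - 1) (x - 1) := by omega
    have := ih (min a x) (by omega) (fun y hy => hl y (by simp [hy]))
    simp only [List.map_cons, List.foldl_cons, ← h1, this]

theorem pv_M_pos (r : List String) (rs : List (List String))
    (hr : r ≠ []) (hrs : ∀ row ∈ rs, row ≠ []) : 1 ≤ pvM r rs := by
  unfold pvM
  have : ∀ (l : List Nat) (a : Nat), 1 ≤ a → (∀ x ∈ l, 1 ≤ x) → 1 ≤ l.foldl min a := by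
    intro l
    induction l with
    | nil => intro a ha _; simpa using ha
    | cons x t ih =>
      intro a ha hl
      simp only [List.foldl_cons]
      exact ih (min a x) (le_min ha (hl x (by simp))) (fun y hy => hl y (by simp [hy]))
  refine this _ _ ?_ ?_
  · cases r with | nil => exact absurd rfl hr | cons _ _ => simp
  · intro x hx
    obtain ⟨row, hrow, rfl⟩ := List.mem_map.1 hx
    have := hrs row hrow
    cases row with | nil => exact absurd rfl this | cons _ _ => simp

theorem pv_M_zero (r : List String) (rs : List (List String))
    (h : r = [] ∨ ∃ row ∈ rs, row = []) : pvM r rs = 0 := by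
  unfold pvM
  rcases h with h | ⟨row, hrow, hrow0⟩
  · subst h
    simp only [List.length_nil]
    have := (PySem.List.foldl_min_le (rs.map (fun row => row.length)) 0).1
    omega
  · have hmem : (0 : Nat) ∈ rs.map (fun row => row.length) := by
      exact List.mem_map.2 ⟨row, hrow, by simp [hrow0]⟩
    have := (PySem.List.foldl_min_le (rs.map (fun row => row.length)) r.length).2 0 hmem
    omega

theorem pv_M_tail (r : List String) (rs : List (List String))
    (hr : r ≠ []) (hrs : ∀ row ∈ rs, row ≠ []) :
    pvM r.tail (rs.map (fun row => row.tail)) = pvM r rs - 1 := by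
  unfold pvM
  have hlen : (rs.map (fun row => row.tail)).map (fun row => row.length)
      = (rs.map (fun row => row.length)).map (fun x => x - 1) := by
    simp only [List.map_map]
    refine List.map_congr_left ?_
    intro row _
    simp [List.length_tail]
  have hrlen : r.tail.length = r.length - 1 := by simp [List.length_tail]
  rw [hlen, hrlen]
  refine pv_foldl_min_sub _ _ ?_ ?_
  · cases r with | nil => exact absurd rfl hr | cons _ _ => simp
  · intro x hx
    obtain ⟨row, hrow, rfl⟩ := List.mem_map.1 hx
    have := hrs row hrow
    cases row with | nil => exact absurd rfl this | cons _ _ => simp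

theorem pv_pyZip_eq (n : Nat) : ∀ (r : List String) (rs : List (List String)), r.length ≤ n →
    pyZipStar (r :: rs) = (List.range (pvM r rs)).map (fun i => pvColAt (r :: rs) i) := by
  induction n with
  | zero =>
    intro r rs hle
    have hr : r = [] := List.eq_nil_of_length_eq_zero (Nat.le_zero.1 hle)
    rw [pyZipStar, pv_M_zero r rs (Or.inl hr)]
    simp [hr]
  | succ n ih =>
    intro r rs hle
    rw [pyZipStar]
    by_cases h : (!r.isEmpty && rs.all (fun row => !row.isEmpty)) = true
    · simp only [h, dif_pos]
      simp only [Bool.and_eq_true, Bool.not_eq_true', List.isEmpty_eq_false_iff, List.all_eq_true] at h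
      have hrs : ∀ row ∈ rs, row ≠ [] := fun row hm => by
        have := h.2 row hm; simpa [List.isEmpty_eq_false_iff] using this
      have hM1 : 1 ≤ pvM r rs := pv_M_pos r rs h.1 hrs
      have htail : r.tail.length ≤ n := by
        have : r.tail.length = r.length - 1 := by simp [List.length_tail]
        omega
      rw [ih r.tail (rs.map (fun row => row.tail)) htail, pv_M_tail r rs h.1 hrs]
      obtain ⟨m, hm⟩ : ∃ m, pvM r rs = m + 1 := ⟨pvM r rs - 1, by omega⟩
      rw [hm]
      simp only [Nat.add_sub_cancel, List.range_succ_eq_map]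
      simp only [List.map_cons, List.map_map]
      refine List.cons_eq_cons.mpr ⟨?_, ?_⟩
      · unfold pvColAt
        simp only [List.map_cons, List.cons_eq_cons, List.getD, List.headD_eq_head?_getD]
        refine ⟨by cases r <;> rfl, ?_⟩
        refine List.map_congr_left (fun row _ => ?_)
        cases row <;> rfl
      · refine List.map_congr_left ?_
        intro i _
        unfold pvColAt
        simp only [Function.comp, List.map_cons, List.map_map]
        rw [pv_getD_tail]
        congr 1
        refine List.map_congr_left ?_
        intro row _
        simp only [Function.comp]
        exact pv_getD_tail row i
    · simp only [h, dif_neg, Bool.not_eq_true]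
      have : r = [] ∨ ∃ row ∈ rs, row = [] := by
        by_contra hc
        push Not at hc
        apply h
        simp only [Bool.and_eq_true, Bool.not_eq_true', List.isEmpty_eq_false_iff, List.all_eq_true]
        exact ⟨hc.1, fun row hm => by simpa [List.isEmpty_eq_false_iff] using hc.2 row hm⟩
      rw [pv_M_zero r rs this]
      simp

-- enumerate over a mapped range, in closed form
theorem pv_enumerate_range_map {α : Type} (g : Nat → α) (W : Nat) :
    PySem.List.enumerate ((List.range W).map g) 0
      = (List.range W).map (fun (i : Nat) => (((i : Nat) : Int), g i)) := by
  induction W with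
  | zero => simp [PySem.List.enumerate_nil]
  | succ W ih =>
    rw [List.range_succ, List.map_append, PySem.List.enumerate_append, ih]
    simp [PySem.List.enumerate_cons, PySem.List.enumerate_nil]

-- a map over a list as a map over its index range
theorem pv_map_eq_range (l : List String) (h : String → Bool) :
    l.map h = (List.range l.length).map (fun i => h (l.getD i "")) := by
  refine List.ext_getElem (by simp) ?_
  intro i h1 h2
  simp only [List.getElem_map, List.getElem_range]
  have : i < l.length := by simpa using h1
  rw [List.getD_eq_getElem?_getD, List.getElem?_eq_getElem this]
  rfl

-- pointwise AND with a row, on an index-range mask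
theorem pv_zipWith_range (n : Nat) (g : Nat → Bool) (row : List String) :
    List.zipWith (fun b c => b && (c == " ")) ((List.range n).map g) row
      = (List.range (min n row.length)).map (fun i => g i && (row.getD i "" == " ")) := by
  refine List.ext_getElem (by simp) ?_
  intro i h1 h2
  have hi : i < row.length := by simp at h1; omega
  simp only [List.getElem_zipWith, List.getElem_map, List.getElem_range]
  rw [List.getD_eq_getElem?_getD, List.getElem?_eq_getElem hi]
  rfl

-- the whole mask fold, in closed form
theorem pv_mask_fold (rs : List (List String)) : ∀ (n : Nat) (g : Nat → Bool),
    rs.foldl (fun m row => List.zipWith (fun b c => b && (c == " ")) m row) ((List.range n).map g)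
      = (List.range ((rs.map (fun row => row.length)).foldl min n)).map
          (fun i => g i && rs.all (fun row => row.getD i "" == " ")) := by
  induction rs with
  | nil => intro n g; simp
  | cons row t ih =>
    intro n g
    simp only [List.foldl_cons, List.map_cons]
    rw [pv_zipWith_range, ih]
    refine List.map_congr_left ?_
    intro i _
    simp [List.all_cons, Bool.and_assoc]

-- the two loop bodies as named step functions
def pvStepA (st : List (Int × Int) × Int) (b : Int) : List (Int × Int) × Int :=
  ((if b > st.2 then st.1 ++ [(st.2, b)] else st.1), b + 1)

def pvStepB (st : List (Int × Int) × Option Int) (p : Int × Bool) : List (Int × Int) × Option Int :=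
  if p.2 then
    ((match st.2 with
      | some s => st.1 ++ [(s, p.1)]
      | none => st.1), none)
  else
    (st.1, match st.2 with
           | none => some p.1
           | some s => some s)

def pvSA (f : Nat → Bool) (k : Nat) : List (Int × Int) × Int :=
  (((List.range k).filter f).map (fun i => ((i : Nat) : Int))).foldl
    (fun (st : List (Int × Int) × Int) b =>
      ((if b > st.2 then st.1 ++ [(st.2, b)] else st.1), b + 1)) ([], 0)

def pvSB (f : Nat → Bool) (k : Nat) : List (Int × Int) × Option Int :=
  ((List.range k).map (fun i => (((i : Nat) : Int), f i))).foldl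
    (fun (st : List (Int × Int) × Option Int) p =>
      if p.2 then
        ((match st.2 with
          | some s => st.1 ++ [(s, p.1)]
          | none => st.1), none)
      else
        (st.1, match st.2 with
               | none => some p.1
               | some s => some s)) ([], none)

-- the loop invariant linking A's (ranges, start) to B's (ranges, Optional start)
theorem pv_inv (f : Nat → Bool) (k : Nat) :
    (pvSB f k).1 = (pvSA f k).1
    ∧ (pvSB f k).2 = (if (pvSA f k).2 < (k : Int) then some (pvSA f k).2 else none)
    ∧ 0 ≤ (pvSA f k).2 ∧ (pvSA f k).2 ≤ (k : Int) := by
  induction k with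
  | zero => simp [pvSA, pvSB]
  | succ k ih =>
    obtain ⟨h1, h2, h3, h4⟩ := ih
    have hA : pvSA f (k + 1) = if f k then pvStepA (pvSA f k) (k : Int) else pvSA f k := by
      unfold pvSA
      rw [List.range_succ, List.filter_append, List.map_append, List.foldl_append]
      by_cases hf : f k <;> simp [hf, pvStepA]
    have hB : pvSB f (k + 1) = pvStepB (pvSB f k) ((k : Int), f k) := by
      unfold pvSB
      rw [List.range_succ, List.map_append, List.foldl_append]
      simp [pvStepB]
    rw [hA, hB]
    by_cases hf : f k
    · rw [if_pos hf]
      by_cases hlt : (pvSA f k).2 < (k : Int)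
      · simp only [pvStepA, pvStepB, hf, ite_true, h1, h2, if_pos hlt]
        refine ⟨trivial, ?_, by omega, by push_cast; omega⟩
        rw [if_neg (by push_cast; omega)]
      · simp only [pvStepA, pvStepB, hf, ite_true, h1, h2, if_neg hlt]
        refine ⟨trivial, ?_, by omega, by push_cast; omega⟩
        rw [if_neg (by push_cast; omega)]
    · have hb : f k = false := by simpa using hf
      rw [if_neg hf]
      simp only [pvStepB, hb, Bool.false_eq_true, ite_false]
      refine ⟨h1, ?_, h3, by push_cast; omega⟩
      by_cases hlt : (pvSA f k).2 < (k : Int)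
      · rw [h2, if_pos hlt, if_pos (by push_cast; omega)]
      · have heq : (pvSA f k).2 = (k : Int) := by omega
        rw [h2, if_neg hlt, if_pos (by push_cast; omega), heq]

-- ===== VERDICT (by name: the statement is the Claim_ definition above) =====
theorem find_problem_ranges_spec : Claim_equal_find_problem_ranges := by
  intro grid _
  unfold Spec_find_problem_ranges find_problem_ranges find_problem_ranges_alt
  cases grid with
  | nil => simp [PySem.List.enumerate_nil]
  | cons r rs =>
    simp only [List.isEmpty_cons, if_neg Bool.false_ne_true]
    -- reduce both sides to folds over the index range [0, M)
    set f : Nat → Bool := fun i => (r :: rs).all (fun row => row.getD i "" == " ") with hfdef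
    -- A side: cols, blank indices
    rw [pv_pyZip_eq r.length r rs le_rfl]
    rw [pv_enumerate_range_map]
    rw [List.filter_map, List.map_map]
    have hApred : ((fun p => p.2.all (fun ch => ch == " ")) ∘ (fun (i : Nat) => (((i : Nat) : Int), pvColAt (r :: rs) i))) = f := by
      funext i
      simp [Function.comp_def, pvColAt, List.all_map, hfdef]
    rw [hApred]
    have hfilter : ((List.range (pvM r rs)).filter f).map ((fun p => p.1) ∘ fun i => (((i : Nat) : Int), pvColAt (r :: rs) i))
        = ((List.range (pvM r rs)).filter f).map (fun i => ((i : Nat) : Int)) :=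
      List.map_congr_left (fun i _ => rfl)
    rw [hfilter]
    -- B side: mask
    rw [pv_map_eq_range r (fun c => c == " "), pv_mask_fold]
    have hBpred : (fun i => (r.getD i "" == " ") && rs.all (fun row => row.getD i "" == " ")) = f := by
      funext i
      simp [hfdef, List.all_cons]
    rw [hBpred]
    have hMdef : (rs.map (fun row => row.length)).foldl min r.length = pvM r rs := rfl
    rw [hMdef]
    rw [pv_enumerate_range_map]
    simp only [List.length_map, List.length_range]
    -- both folds are pvSA / pvSB; apply the invariant
    obtain ⟨h1, h2, h3, h4⟩ := pv_inv f (pvM r rs)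
    simp only [pvSA, pvSB] at h1 h2 h3 h4
    by_cases hlt : (List.foldl (fun (st : List (Int × Int) × Int) b =>
        ((if b > st.2 then st.1 ++ [(st.2, b)] else st.1), b + 1)) ([], 0)
        (((List.range (pvM r rs)).filter f).map (fun i => ((i : Nat) : Int)))).2 < ((pvM r rs : Nat) : Int)
    · rw [if_pos hlt, h2, if_pos hlt, h1]
    · rw [if_neg hlt, h2, if_neg hlt, h1]
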